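-- pv_equiv track=rewrite | github.com/Arnie016/erdos170 | src/sparse_ruler/stage1.py | responsibility_scores
-- ===== SOURCE A (Python) =====
-- from typing import Dict, Iterable, List, Optional, Sequence, Tuple
--
-- def responsibility_scores(marks: Sequence[int], W: Sequence[int], max_d: int) -> Dict[int, int]:
--     scores = {mark: 0 for mark in marks}
--     for i, ai in enumerate(marks):
--         for j in range(i + 1, len(marks)):
--             aj = marks[j]
--             d = abs(aj - ai)
--             if d <= max_d and W[d] == 1:
--                 scores[ai] += 1
--                 scores[aj] += 1
--     return scores
-- ===== SOURCE B (Python) =====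
-- def responsibility_scores(marks, W, max_d):
--     cnt = {}
--     for m in marks:
--         cnt[m] = cnt.get(m, 0) + 1
--
--     def ok(d):
--         return d <= max_d and W[d] == 1
--
--     return {v: c * sum(cu for u, cu in cnt.items() if u != v and ok(abs(u - v)))
--               + (c * (c - 1) if c >= 2 and ok(0) else 0)
--            for v, c in cnt.items()}
-- ===== Notes on version B (the rewrite author's own statement) =====
-- stated objective: alternative
-- what changed: A's all-index-pairs nested loop with per-pair dict increments is replaced by a single counter of value multiplicities, from which each distinct value's score is computed in closed form (cross-value products plus a c*(c-1) diagonal term for duplicates).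
import Mathlib
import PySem

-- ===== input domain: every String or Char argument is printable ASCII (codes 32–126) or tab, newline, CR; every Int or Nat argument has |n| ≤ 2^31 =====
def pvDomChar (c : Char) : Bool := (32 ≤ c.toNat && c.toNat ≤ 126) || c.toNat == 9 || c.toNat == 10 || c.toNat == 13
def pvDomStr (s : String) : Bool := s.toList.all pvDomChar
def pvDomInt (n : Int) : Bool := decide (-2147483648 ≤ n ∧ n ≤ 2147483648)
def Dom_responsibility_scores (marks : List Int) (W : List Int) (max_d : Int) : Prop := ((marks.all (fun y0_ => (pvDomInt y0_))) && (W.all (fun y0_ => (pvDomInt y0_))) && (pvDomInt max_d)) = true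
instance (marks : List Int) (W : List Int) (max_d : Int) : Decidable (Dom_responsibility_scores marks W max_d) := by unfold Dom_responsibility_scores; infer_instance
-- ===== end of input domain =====

-- B replaces A's all-index-pairs dict-update loop by one pass grouped by value multiplicities
-- (a hand-built counter), computing each distinct value's score in closed form from the counts
-- (objective: alternative decomposition, not claimed faster).

-- ===== PORT A =====
def responsibility_scores (marks : List Int) (W : List Int) (max_d : Int) : List (Int × Int) :=
  -- scores = {mark: 0 for mark in marks}
  let scores0 : PySem.Dict Int Int := marks.foldl (fun d m => d.insert m 0) PySem.Dict.empty
  -- for i, ai in enumerate(marks): for j in range(i+1, len(marks)): …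
  let scores := (PySem.List.enumerate marks 0).foldl
    (fun sc p =>
      (PySem.List.pyRange (p.1 + 1) (PySem.List.len marks) 1).foldl
        (fun sc2 j =>
          let aj := PySem.List.pyGetD marks j 0
          let d := |aj - p.2|
          -- 'W[d] == 1' ported as 'pyGet? W d = some 1' (Pre_ excludes the raising case d ≥ len W)
          if d ≤ max_d ∧ PySem.List.pyGet? W d = some 1 then
            (sc2.modify p.2 0 (· + 1)).modify aj 0 (· + 1)
          else sc2)
        sc)
    scores0
  scores.items

-- ===== PORT B =====
def responsibility_scores_alt (marks : List Int) (W : List Int) (max_d : Int) : List (Int × Int) :=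
  -- cnt = {}; for m in marks: cnt[m] = cnt.get(m, 0) + 1
  let cnt : PySem.Dict Int Int := marks.foldl (fun d m => d.insert m (d.getD m 0 + 1)) PySem.Dict.empty
  -- def ok(d): return d <= max_d and W[d] == 1
  let ok : Int → Bool := fun d => decide (d ≤ max_d ∧ PySem.List.pyGet? W d = some 1)
  -- {v: c * sum(cu for u, cu in cnt.items() if u != v and ok(abs(u - v)))
  --     + (c*(c-1) if c >= 2 and ok(0) else 0)   for v, c in cnt.items()}
  (cnt.items.foldl
    (fun out p =>
      out.insert p.1
        (p.2 * (cnt.items.foldl (fun s u => if u.1 ≠ p.1 ∧ ok |u.1 - p.1| = true then s + u.2 else s) 0)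
          + (if 2 ≤ p.2 ∧ ok 0 = true then p.2 * (p.2 - 1) else 0)))
    PySem.Dict.empty).items

-- ===== PRECONDITION & SPEC =====
-- Pre_ excludes exactly the inputs on which the Python A raises IndexError (some occurring
-- distance d = |marks[i] - marks[j]| has d ≤ max_d but d ≥ len(W)); Python B raises there too.
def Pre_responsibility_scores (marks : List Int) (W : List Int) (max_d : Int) : Prop :=
  ∀ i, (hi : i < marks.length) → ∀ j, (hj : j < marks.length) → i ≠ j →
    |marks[i] - marks[j]| ≤ max_d → |marks[i] - marks[j]| < (W.length : Int)
instance (marks : List Int) (W : List Int) (max_d : Int) : Decidable (Pre_responsibility_scores marks W max_d) := by unfold Pre_responsibility_scores; infer_instance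

def pvWitness_responsibility_scores : List Int × List Int × Int := ([0, 2, 2, 5], [1, 0, 1], 2)

def Spec_responsibility_scores (marks : List Int) (W : List Int) (max_d : Int) (out : List (Int × Int)) : Prop := out = responsibility_scores_alt marks W max_d
instance (marks : List Int) (W : List Int) (max_d : Int) (out : List (Int × Int)) : Decidable (Spec_responsibility_scores marks W max_d out) := by unfold Spec_responsibility_scores; infer_instance

-- ===== CLAIM (what is proved, stated in full; the proofs are below) =====
def Claim_equal_responsibility_scores : Prop := ∀ (marks : List Int) (W : List Int) (max_d : Int), Dom_responsibility_scores marks W max_d → Pre_responsibility_scores marks W max_d → Spec_responsibility_scores marks W max_d (responsibility_scores marks W max_d)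

-- ===== LEMMAS AND PROOFS =====

-- the qualifying test 'd <= max_d and W[d] == 1' as a 0/1 indicator
def pvInd (W : List Int) (max_d d : Int) : Int :=
  if d ≤ max_d ∧ PySem.List.pyGet? W d = some 1 then 1 else 0

-- one inner-loop step of A: process the (ai, aj) = (a, b) pair
def pvStep (W : List Int) (max_d a : Int) (s : PySem.Dict Int Int) (b : Int) : PySem.Dict Int Int :=
  if |b - a| ≤ max_d ∧ PySem.List.pyGet? W |b - a| = some 1 then
    (s.modify a 0 (· + 1)).modify b 0 (· + 1)
  else s

-- A's nested loop, re-expressed structurally on the list of marks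
def pvPairFold (W : List Int) (max_d : Int) : List Int → PySem.Dict Int Int → PySem.Dict Int Int
  | [], sc => sc
  | a :: t, sc => pvPairFold W max_d t (t.foldl (pvStep W max_d a) sc)

-- total contribution of A's loop to key v
def pvP (W : List Int) (max_d : Int) : List Int → Int → Int
  | [], _ => 0
  | a :: t, v =>
      (t.map (fun b => pvInd W max_d |b - a| *
        ((if a = v then 1 else 0) + (if b = v then 1 else 0)))).sum + pvP W max_d t v

-- number of elements of l at qualifying distance from v
def pvS (W : List Int) (max_d : Int) (l : List Int) (v : Int) : Int :=
  (l.map (fun b => pvInd W max_d |b - v|)).sum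

-- B's per-key value, in closed form
def pvBval (W : List Int) (max_d : Int) (marks : List Int) (v : Int) : Int :=
  (marks.count v : Int) *
      ((PySem.Set.ofList marks).map (fun u =>
        if u ≠ v ∧ (|u - v| ≤ max_d ∧ PySem.List.pyGet? W |u - v| = some 1)
        then (marks.count u : Int) else 0)).sum
    + (if 2 ≤ (marks.count v : Int) ∧ ((0:Int) ≤ max_d ∧ PySem.List.pyGet? W 0 = some 1)
       then (marks.count v : Int) * ((marks.count v : Int) - 1) else 0)

lemma pv_getD_step (W : List Int) (max_d a b v : Int) (s : PySem.Dict Int Int) :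
    (pvStep W max_d a s b).getD v 0 = s.getD v 0 +
      pvInd W max_d |b - a| * ((if a = v then 1 else 0) + (if b = v then 1 else 0)) := by
  unfold pvStep pvInd
  by_cases h : (|b - a| ≤ max_d ∧ PySem.List.pyGet? W |b - a| = some 1)
  · rw [if_pos h, if_pos h]
    simp only [PySem.Dict.getD_modify]
    split_ifs <;> subst_vars <;> omega
  · rw [if_neg h, if_neg h]; ring

lemma pv_keys_step (W : List Int) (max_d a b : Int) (s : PySem.Dict Int Int)
    (ha : a ∈ s.keys) (hb : b ∈ s.keys) : (pvStep W max_d a s b).keys = s.keys := by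
  unfold pvStep
  split_ifs with h
  · have hca : s.contains a = true := (PySem.Dict.contains_iff_mem_keys _ _).2 ha
    have hka : (s.modify a 0 (· + 1)).keys = s.keys := by
      rw [PySem.Dict.keys_modify, PySem.Dict.keys_insert_of_contains _ _ hca]
    have hcb : (s.modify a 0 (· + 1)).contains b = true := by
      rw [PySem.Dict.contains_modify]
      simp [(PySem.Dict.contains_iff_mem_keys _ _).2 hb]
    rw [PySem.Dict.keys_modify, PySem.Dict.keys_insert_of_contains _ _ hcb, hka]
  · rfl

lemma pv_getD_inner (W : List Int) (max_d a v : Int) :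
    ∀ (t : List Int) (sc : PySem.Dict Int Int),
      (t.foldl (pvStep W max_d a) sc).getD v 0 = sc.getD v 0 +
        (t.map (fun b => pvInd W max_d |b - a| *
          ((if a = v then 1 else 0) + (if b = v then 1 else 0)))).sum := by
  intro t
  induction t with
  | nil => intro sc; simp
  | cons b t ih =>
      intro sc
      simp only [List.foldl_cons, List.map_cons, List.sum_cons, ih, pv_getD_step]
      ring

lemma pv_keys_inner (W : List Int) (max_d a : Int) :
    ∀ (t : List Int) (sc : PySem.Dict Int Int), a ∈ sc.keys → (∀ x ∈ t, x ∈ sc.keys) →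
      (t.foldl (pvStep W max_d a) sc).keys = sc.keys := by
  intro t
  induction t with
  | nil => intro sc _ _; rfl
  | cons b t ih =>
      intro sc hadd hall
      have hb : b ∈ sc.keys := hall b (by simp)
      have hk : (pvStep W max_d a sc b).keys = sc.keys := pv_keys_step W max_d a b sc hadd hb
      simp only [List.foldl_cons]
      rw [ih (pvStep W max_d a sc b) (hk ▸ hadd) (fun x hx => hk ▸ hall x (by simp [hx])), hk]

lemma pv_getD_pairFold (W : List Int) (max_d v : Int) :
    ∀ (xs : List Int) (sc : PySem.Dict Int Int),
      (pvPairFold W max_d xs sc).getD v 0 = sc.getD v 0 + pvP W max_d xs v := by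
  intro xs
  induction xs with
  | nil => intro sc; simp [pvPairFold, pvP]
  | cons a t ih =>
      intro sc
      simp only [pvPairFold, pvP, ih, pv_getD_inner]
      ring

lemma pv_keys_pairFold (W : List Int) (max_d : Int) :
    ∀ (xs : List Int) (sc : PySem.Dict Int Int), (∀ x ∈ xs, x ∈ sc.keys) →
      (pvPairFold W max_d xs sc).keys = sc.keys := by
  intro xs
  induction xs with
  | nil => intro sc _; rfl
  | cons a t ih =>
      intro sc hall
      have ha : a ∈ sc.keys := hall a (by simp)
      have hk : (t.foldl (pvStep W max_d a) sc).keys = sc.keys :=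
        pv_keys_inner W max_d a t sc ha (fun x hx => hall x (by simp [hx]))
      simp only [pvPairFold]
      rw [ih _ (fun x hx => hk ▸ hall x (by simp [hx])), hk]

lemma pv_getD_init (v : Int) :
    ∀ (l : List Int) (d : PySem.Dict Int Int), d.getD v 0 = 0 →
      (l.foldl (fun d m => d.insert m 0) d).getD v 0 = 0 := by
  intro l
  induction l with
  | nil => intro d h; simpa using h
  | cons m t ih =>
      intro d h
      simp only [List.foldl_cons]
      exact ih _ (by rw [PySem.Dict.getD_insert]; split_ifs <;> simp [h])

-- Σ_{b ∈ t} pvInd |b - a| · [b = v]  =  count v t · pvInd |v - a|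
lemma pv_sum_ind_count (W : List Int) (max_d a v : Int) :
    ∀ (t : List Int),
      (t.map (fun b => pvInd W max_d |b - a| * (if b = v then 1 else 0))).sum
        = (t.count v : Int) * pvInd W max_d |v - a| := by
  intro t
  induction t with
  | nil => simp
  | cons b t ih =>
      simp only [List.map_cons, List.sum_cons, ih, List.count_cons]
      by_cases h : b = v
      · subst h; push_cast; simp; ring
      · simp [h]

-- the closed form of A's per-key contribution
lemma pv_P_closed (W : List Int) (max_d : Int) :
    ∀ (l : List Int) (v : Int),
      pvP W max_d l v = (l.count v : Int) * pvS W max_d l v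
        - (l.count v : Int) * pvInd W max_d 0 := by
  intro l
  induction l with
  | nil => intro v; simp [pvP, pvS]
  | cons a t ih =>
      intro v
      have hsplit : (t.map (fun b => pvInd W max_d |b - a| *
            ((if a = v then 1 else 0) + (if b = v then 1 else 0)))).sum
          = (t.map (fun b => pvInd W max_d |b - a| * (if a = v then 1 else 0))).sum
            + (t.map (fun b => pvInd W max_d |b - a| * (if b = v then 1 else 0))).sum := by
        rw [← PySem.List.sum_map_add_int]
        refine congrArg List.sum (List.map_congr_left ?_)
        intro b _; ring
      simp only [pvP, pvS, List.map_cons, List.sum_cons, List.count_cons, hsplit, ih,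
        pv_sum_ind_count]
      by_cases h : a = v
      · subst h
        simp only [beq_self_eq_true, if_pos]
        have h0 : |a - a| = (0:Int) := by simp
        have hS : (t.map (fun b => pvInd W max_d |b - a| * 1)).sum = pvS W max_d t a := by
          simp [pvS]
        rw [hS]
        simp only [h0]
        push_cast
        unfold pvS
        ring
      · have hbeq : (v == a) = false := by simp [Ne.symm h]
        rw [abs_sub_comm v a]
        push_cast
        simp [h]
        ring

lemma pv_sum_single (g : Int → Int) :
    ∀ (ks : List Int) (b : Int), ks.Nodup → b ∈ ks →
      (ks.map (fun u => if u = b then g u else 0)).sum = g b := by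
  intro ks
  induction ks with
  | nil => intro b _ h; simp at h
  | cons k ks ih =>
      intro b hnd hb
      simp only [List.map_cons, List.sum_cons]
      rcases List.mem_cons.1 hb with h | h
      · subst h
        have : ∀ u ∈ ks, (if u = b then g u else 0) = 0 := by
          intro u hu
          have : u ≠ b := fun e => (List.nodup_cons.1 hnd).1 (e ▸ hu)
          simp [this]
        rw [if_pos rfl, List.sum_eq_zero (by simpa using this)]
        ring
      · have hkb : k ≠ b := fun e => (List.nodup_cons.1 hnd).1 (e ▸ h)
        rw [if_neg hkb, ih b (List.nodup_cons.1 hnd).2 h]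
        ring

-- grouping a sum over l by the distinct values ks
lemma pv_sum_group (g : Int → Int) :
    ∀ (l ks : List Int), ks.Nodup → (∀ x ∈ l, x ∈ ks) →
      (l.map g).sum = (ks.map (fun u => (l.count u : Int) * g u)).sum := by
  intro l
  induction l with
  | nil => intro ks _ _; simp
  | cons b t ih =>
      intro ks hnd hall
      simp only [List.map_cons, List.sum_cons, List.count_cons]
      have hsplit : (ks.map (fun u => ((t.count u + if (b == u) then 1 else 0 : Nat) : Int) * g u)).sum
          = (ks.map (fun u => (t.count u : Int) * g u)).sum
            + (ks.map (fun u => if u = b then g u else 0)).sum := by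
        rw [← PySem.List.sum_map_add_int]
        refine congrArg List.sum (List.map_congr_left ?_)
        intro u _
        by_cases h : u = b
        · subst h; simp; ring
        · have : (b == u) = false := by simp [Ne.symm h]
          simp [this, h]
      rw [hsplit, pv_sum_single g ks b hnd (hall b (by simp)),
        ih ks hnd (fun x hx => hall x (by simp [hx]))]
      ring

-- splitting off the u = v term of a sum over distinct values
lemma pv_sum_split (g : Int → Int) :
    ∀ (ks : List Int) (v : Int), ks.Nodup → v ∈ ks →
      (ks.map g).sum = g v + (ks.map (fun u => if u = v then 0 else g u)).sum := by
  intro ks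
  induction ks with
  | nil => intro v _ h; simp at h
  | cons k ks ih =>
      intro v hnd hv
      simp only [List.map_cons, List.sum_cons]
      rcases List.mem_cons.1 hv with h | h
      · subst h
        have : ∀ u ∈ ks, (if u = v then 0 else g u) = g u := by
          intro u hu
          have : u ≠ v := fun e => (List.nodup_cons.1 hnd).1 (e ▸ hu)
          simp [this]
        rw [if_pos rfl, List.map_congr_left this]
        ring
      · have hkv : k ≠ v := fun e => (List.nodup_cons.1 hnd).1 (e ▸ h)
        rw [if_neg hkv, ih v (List.nodup_cons.1 hnd).2 h]
        ring

-- B's inner accumulation loop as a sum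
lemma pv_foldl_if_add (cond : Int × Int → Prop) [DecidablePred cond] :
    ∀ (l : List (Int × Int)) (s0 : Int),
      l.foldl (fun s u => if cond u then s + u.2 else s) s0
        = s0 + (l.map (fun u => if cond u then u.2 else 0)).sum := by
  intro l
  induction l with
  | nil => intro s0; simp
  | cons u t ih =>
      intro s0
      simp only [List.foldl_cons, List.map_cons, List.sum_cons, ih]
      split_ifs <;> ring

-- A's literal nested index loop equals the structural pvPairFold
lemma pv_loop_eq_pairFold (W : List Int) (max_d : Int) (marks : List Int) :
    ∀ (xs pre : List Int) (sc : PySem.Dict Int Int), pre ++ xs = marks →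
      (PySem.List.enumerate xs (pre.length : Int)).foldl
        (fun sc p =>
          (PySem.List.pyRange (p.1 + 1) (PySem.List.len marks) 1).foldl
            (fun sc2 j =>
              let aj := PySem.List.pyGetD marks j 0
              let d := |aj - p.2|
              if d ≤ max_d ∧ PySem.List.pyGet? W d = some 1 then
                (sc2.modify p.2 0 (· + 1)).modify aj 0 (· + 1)
              else sc2)
            sc)
        sc
      = pvPairFold W max_d xs sc := by
  intro xs
  induction xs with
  | nil => intro pre sc _; simp [PySem.List.enumerate, pvPairFold]
  | cons a t ih =>
      intro pre sc hm
      rw [PySem.List.enumerate_cons, List.foldl_cons]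
      have hin : (PySem.List.pyRange ((pre.length : Int) + 1) (PySem.List.len marks) 1).foldl
          (fun sc2 j =>
            let aj := PySem.List.pyGetD marks j 0
            let d := |aj - a|
            if d ≤ max_d ∧ PySem.List.pyGet? W d = some 1 then
              (sc2.modify a 0 (· + 1)).modify aj 0 (· + 1)
            else sc2)
          sc
          = t.foldl (pvStep W max_d a) sc := by
        have h1 := PySem.List.foldl_pyRange_pyGetD (xs := marks) (d := (0:Int))
          (f := pvStep W max_d a) (init := sc) (a := (pre.length : Int) + 1) (by omega)
        have h2 : ((pre.length : Int) + 1).toNat = pre.length + 1 := by omega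
        have h3 : marks.drop (pre.length + 1) = t := by
          rw [← hm, show pre ++ a :: t = (pre ++ [a]) ++ t by simp,
            show pre.length + 1 = (pre ++ [a]).length by simp, List.drop_left]
        rw [h2, h3] at h1
        exact h1
      rw [hin]
      have hm' : (pre ++ [a]) ++ t = marks := by simpa using hm
      have := ih (pre ++ [a]) (t.foldl (pvStep W max_d a) sc) hm'
      rw [show (((pre ++ [a]).length : Int)) = (pre.length : Int) + 1 by simp] at this
      rw [this]
      rfl

-- A's result, characterised
lemma pv_A_eq (marks W : List Int) (max_d : Int) :
    responsibility_scores marks W max_d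
      = (PySem.Set.ofList marks).map (fun v => (v, pvP W max_d marks v)) := by
  unfold responsibility_scores
  simp only []
  have hk0 : (marks.foldl (fun d m => d.insert m 0) (PySem.Dict.empty : PySem.Dict Int Int)).keys
      = PySem.Set.ofList marks := by
    have h := PySem.Dict.keys_foldl_insert marks (fun _ _ => (0:Int)) PySem.Dict.empty
    simpa [PySem.Set.update_nil_left, PySem.Dict.keys_empty] using h
  have hloop := pv_loop_eq_pairFold W max_d marks marks []
    (marks.foldl (fun d m => d.insert m 0) PySem.Dict.empty) rfl
  rw [show ((([] : List Int).length : Int)) = 0 by simp] at hloop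
  rw [hloop]
  have hkeys : (pvPairFold W max_d marks
      (marks.foldl (fun d m => d.insert m 0) PySem.Dict.empty)).keys = PySem.Set.ofList marks := by
    rw [pv_keys_pairFold W max_d marks _ (fun x hx => by
      rw [hk0]; exact (PySem.Set.mem_ofList _ _).2 hx), hk0]
  rw [PySem.Dict.items_eq_map_keys _ (hkeys ▸ PySem.Set.nodup_ofList marks) 0, hkeys]
  refine List.map_congr_left ?_
  intro v _
  rw [pv_getD_pairFold, pv_getD_init v marks PySem.Dict.empty (by simp [PySem.Dict.getD_empty])]
  ring_nf

-- B's result, characterised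
lemma pv_B_eq (marks W : List Int) (max_d : Int) :
    responsibility_scores_alt marks W max_d
      = (PySem.Set.ofList marks).map (fun v => (v, pvBval W max_d marks v)) := by
  unfold responsibility_scores_alt
  simp only [PySem.Dict.foldl_insert_getD_add_one_eq_counter, decide_eq_true_eq]
  rw [PySem.Dict.items_foldl_insert_fresh _ _ _ _
    (fun a _ => PySem.Dict.contains_empty a.1)
    (by
      have h := PySem.Dict.nodup_keys_counter (κ := Int) marks
      simpa [PySem.Dict.keys] using h)]
  simp only [show (PySem.Dict.empty : PySem.Dict Int Int).items = [] from rfl, List.nil_append]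
  rw [PySem.Dict.items_counter, List.map_map]
  refine List.map_congr_left ?_
  intro v _
  simp only [Function.comp]
  rw [pv_foldl_if_add (fun u => u.1 ≠ v ∧ (|u.1 - v| ≤ max_d ∧ PySem.List.pyGet? W |u.1 - v| = some 1))]
  rw [List.map_map]
  unfold pvBval
  simp [Function.comp_def]

-- the per-key values agree
lemma pv_P_eq_Bval (marks W : List Int) (max_d v : Int) (hv : v ∈ marks) :
    pvP W max_d marks v = pvBval W max_d marks v := by
  have hc1 : 1 ≤ (marks.count v : Int) := by
    have := List.count_pos_iff.2 hv
    omega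
  have hnd := PySem.Set.nodup_ofList (α := Int) marks
  have hmem : ∀ x ∈ marks, x ∈ PySem.Set.ofList marks :=
    fun x hx => (PySem.Set.mem_ofList _ _).2 hx
  have hvk : v ∈ PySem.Set.ofList marks := hmem v hv
  rw [pv_P_closed]
  have hS : pvS W max_d marks v
      = ((PySem.Set.ofList marks).map (fun u => (marks.count u : Int) * pvInd W max_d |u - v|)).sum := by
    unfold pvS
    exact pv_sum_group (fun b => pvInd W max_d |b - v|) marks (PySem.Set.ofList marks) hnd hmem
  have hsplit := pv_sum_split (fun u => (marks.count u : Int) * pvInd W max_d |u - v|)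
    (PySem.Set.ofList marks) v hnd hvk
  beta_reduce at hsplit
  have hvv : |v - v| = (0:Int) := by simp
  rw [hvv] at hsplit
  have hrest : ((PySem.Set.ofList marks).map (fun u =>
        if u = v then 0 else (marks.count u : Int) * pvInd W max_d |u - v|)).sum
      = ((PySem.Set.ofList marks).map (fun u =>
        if u ≠ v ∧ (|u - v| ≤ max_d ∧ PySem.List.pyGet? W |u - v| = some 1)
        then (marks.count u : Int) else 0)).sum := by
    refine congrArg List.sum (List.map_congr_left ?_)
    intro u _
    by_cases h : u = v
    · simp [h]
    · unfold pvInd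
      by_cases hq : (|u - v| ≤ max_d ∧ PySem.List.pyGet? W |u - v| = some 1)
      · simp [h, hq]
      · simp [h, hq]
  have hdiag : (marks.count v : Int) * ((marks.count v : Int) - 1) * pvInd W max_d 0
      = (if 2 ≤ (marks.count v : Int) ∧ ((0:Int) ≤ max_d ∧ PySem.List.pyGet? W 0 = some 1)
         then (marks.count v : Int) * ((marks.count v : Int) - 1) else 0) := by
    unfold pvInd
    by_cases hq : ((0:Int) ≤ max_d ∧ PySem.List.pyGet? W 0 = some 1)
    · by_cases h2 : 2 ≤ (marks.count v : Int)
      · simp [hq, h2]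
      · have : (marks.count v : Int) = 1 := by omega
        simp [hq, this]
    · simp [hq]
  rw [hS, hsplit, hrest]
  unfold pvBval
  rw [← hdiag]
  ring

-- A = B
lemma pv_AB_eq (marks W : List Int) (max_d : Int) :
    responsibility_scores marks W max_d = responsibility_scores_alt marks W max_d := by
  rw [pv_A_eq, pv_B_eq]
  refine List.map_congr_left ?_
  intro v hvk
  rw [pv_P_eq_Bval marks W max_d v ((PySem.Set.mem_ofList _ _).1 hvk)]

-- ===== VERDICT (by name: the statement is the Claim_ definition above) =====
theorem responsibility_scores_spec : Claim_equal_responsibility_scores := by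
  intro marks W max_d _ _
  unfold Spec_responsibility_scores
  exact pv_AB_eq marks W max_d
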